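-- pv_equiv track=rewrite | github.com/Tai06022001/Data-Science | lastname_firstname_grade_the_exams.py | grade_calculation
-- ===== SOURCE A (Python) =====
-- def grade_calculation(answer_key,line):
--     total_grade = 0
--     answer = answer_key.split(',')
--     for index in range(len(answer)):
--         if (line[index] == answer[index]):
--             total_grade += 4
--         elif (line[index] != answer[index] and line[index]!=''):
--             total_grade -= 1
--         else:
--             total_grade += 0
--     return total_grade
-- ===== SOURCE B (Python) =====
-- def grade_calculation(answer_key, line):
--     answer = answer_key.split(',')
--     correct = sum(1 for i in range(len(answer)) if line[i] == answer[i])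
--     wrong = sum(1 for i in range(len(answer))
--                 if line[i] != answer[i] and line[i] != '')
--     return 4 * correct - wrong
-- ===== Notes on version B (the rewrite author's own statement) =====
-- stated objective: alternative
-- what changed: Replaces the single accumulator loop with two counting comprehensions (correct / wrong answers) combined by the closed form 4*correct - wrong.
import Mathlib
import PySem

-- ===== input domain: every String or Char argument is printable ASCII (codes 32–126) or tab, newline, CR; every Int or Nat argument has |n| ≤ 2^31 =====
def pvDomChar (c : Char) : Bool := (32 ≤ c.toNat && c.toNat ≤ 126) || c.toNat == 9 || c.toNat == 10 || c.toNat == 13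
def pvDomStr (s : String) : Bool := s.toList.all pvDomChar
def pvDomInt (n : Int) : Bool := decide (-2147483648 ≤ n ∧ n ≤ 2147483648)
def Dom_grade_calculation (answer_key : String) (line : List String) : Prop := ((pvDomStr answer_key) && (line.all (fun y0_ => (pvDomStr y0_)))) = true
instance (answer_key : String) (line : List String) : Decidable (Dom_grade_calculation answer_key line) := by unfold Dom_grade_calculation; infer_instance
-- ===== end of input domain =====

-- B replaces A's accumulator loop by two counts (correct/wrong) combined as 4*correct - wrong.

-- ===== PORT A =====
def grade_calculation (answer_key : String) (line : List String) : Int :=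
  let answer := (PySem.Str.split? answer_key ",").getD []
  (PySem.List.pyRange 0 answer.length 1).foldl
    (fun total_grade index =>
      if PySem.List.pyGetD line index "" == PySem.List.pyGetD answer index "" then
        total_grade + 4
      else if PySem.List.pyGetD line index "" != PySem.List.pyGetD answer index ""
              && PySem.List.pyGetD line index "" != "" then
        total_grade - 1
      else
        total_grade + 0) 0

-- ===== PORT B =====
def grade_calculation_alt (answer_key : String) (line : List String) : Int :=
  let answer := (PySem.Str.split? answer_key ",").getD []
  let idxs := PySem.List.pyRange 0 answer.length 1
  let correct := (idxs.filter
    (fun i => PySem.List.pyGetD line i "" == PySem.List.pyGetD answer i "")).length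
  let wrong := (idxs.filter
    (fun i => PySem.List.pyGetD line i "" != PySem.List.pyGetD answer i ""
              && PySem.List.pyGetD line i "" != "")).length
  4 * (correct : Int) - (wrong : Int)

-- ===== PRECONDITION & SPEC =====
-- Pre_ excludes exactly the inputs where A raises IndexError: line shorter than the split key.
def Pre_grade_calculation (answer_key : String) (line : List String) : Prop :=
  ((PySem.Str.split? answer_key ",").getD []).length ≤ line.length
instance (answer_key : String) (line : List String) : Decidable (Pre_grade_calculation answer_key line) := by unfold Pre_grade_calculation; infer_instance
def pvWitness_grade_calculation : String × List String := ("a,b,c", ["a", "", "x"])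

def Spec_grade_calculation (answer_key : String) (line : List String) (out : Int) : Prop := out = grade_calculation_alt answer_key line
instance (answer_key : String) (line : List String) (out : Int) : Decidable (Spec_grade_calculation answer_key line out) := by unfold Spec_grade_calculation; infer_instance

-- ===== CLAIM (what is proved, stated in full; the proofs are below) =====
def Claim_equal_grade_calculation : Prop := ∀ (answer_key : String) (line : List String), Dom_grade_calculation answer_key line → Pre_grade_calculation answer_key line → Spec_grade_calculation answer_key line (grade_calculation answer_key line)

-- ===== LEMMAS AND PROOFS =====
lemma fold_count (c w : Int → Bool) (hcw : ∀ i, c i = true → w i = false) :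
    ∀ (l : List Int) (acc : Int),
      l.foldl (fun t i => if c i then t + 4 else if w i then t - 1 else t + 0) acc
        = acc + 4 * ((l.filter c).length : Int) - ((l.filter w).length : Int) := by
  intro l
  induction l with
  | nil => intro acc; simp
  | cons x xs ih =>
    intro acc
    simp only [List.foldl_cons, List.filter_cons]
    by_cases hc : c x = true
    · have hw := hcw x hc
      simp only [hc, hw, if_true, Bool.false_eq_true, if_false, List.length_cons]
      rw [ih]
      push_cast
      ring
    · simp only [Bool.not_eq_true] at hc
      by_cases hw : w x = true
      · simp only [hc, hw, Bool.false_eq_true, if_false, if_true, List.length_cons]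
        rw [ih]
        push_cast
        ring
      · simp only [Bool.not_eq_true] at hw
        simp only [hc, hw, Bool.false_eq_true, if_false]
        rw [ih]
        ring

-- ===== VERDICT (by name: the statement is the Claim_ definition above) =====
theorem grade_calculation_spec : Claim_equal_grade_calculation := by
  intro answer_key line _ _
  unfold Spec_grade_calculation grade_calculation grade_calculation_alt
  rw [fold_count]
  · simp
  · intro i hi
    simp only [bne, Bool.and_eq_false_iff, Bool.not_eq_eq_eq_not]
    left
    exact hi
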